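-- pv_equiv track=rewrite | github.com/lenaireland/Coding-challenges | find_combos.py | find_combos
-- ===== SOURCE A (Python) =====
-- def find_combos(chars, k):
--     """Given a set of characters (chars) and an integer (k), return a list of
--     all possible strings of length k that can be formed, sorted alphabetically.
--
--     >>> find_combos(set(['a','b','c']), 2)
--     ['aa', 'ab', 'ac', 'ba', 'bb', 'bc', 'ca', 'cb', 'cc']
--
--     >>> find_combos(set(['a','b','c']), 3)
--     ['aaa', 'aab', 'aac', 'aba', 'abb', 'abc', 'aca', 'acb', 'acc', 'baa', 'bab', 'bac', 'bba', 'bbb', 'bbc', 'bca', 'bcb', 'bcc', 'caa', 'cab', 'cac', 'cba', 'cbb', 'cbc', 'cca', 'ccb', 'ccc']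
--
--     >>> find_combos(set(['a','b']), 2)
--     ['aa', 'ab', 'ba', 'bb']
--
--     >>> find_combos(set(['a','b']), 3)
--     ['aaa', 'aab', 'aba', 'abb', 'baa', 'bab', 'bba', 'bbb']
--
--     >>> find_combos(set(['a']), 1)
--     ['a']
--
--     >>> find_combos(set(['a']), 2)
--     ['aa']
--     """
--
--     char_strings = list(chars)
--
--     i = 1
--
--     while i < k:
--         new_strings = []
--         for char in chars:
--             for char_string in char_strings:
--                 new_strings.append(char_string + char)
--
--         char_strings = new_strings[:]
--         i += 1
--
--     char_strings.sort()
--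
--     return char_strings
-- ===== SOURCE B (Python) =====
-- def find_combos(chars, k):
--     """Recursive formulation: the length-k strings are the length-(k-1)
--     strings each extended by one character; sort at each level."""
--     if k <= 1:
--         return sorted(chars)
--     return sorted(prev + c for prev in find_combos(chars, k - 1) for c in chars)
-- ===== Notes on version B (the rewrite author's own statement) =====
-- stated objective: simpler
-- what changed: Replaces the imperative while-loop with explicit accumulator lists and a final in-place sort by a two-line recursion on k that extends the (k-1)-length strings by one character, sorting at each level.
import Mathlib
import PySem

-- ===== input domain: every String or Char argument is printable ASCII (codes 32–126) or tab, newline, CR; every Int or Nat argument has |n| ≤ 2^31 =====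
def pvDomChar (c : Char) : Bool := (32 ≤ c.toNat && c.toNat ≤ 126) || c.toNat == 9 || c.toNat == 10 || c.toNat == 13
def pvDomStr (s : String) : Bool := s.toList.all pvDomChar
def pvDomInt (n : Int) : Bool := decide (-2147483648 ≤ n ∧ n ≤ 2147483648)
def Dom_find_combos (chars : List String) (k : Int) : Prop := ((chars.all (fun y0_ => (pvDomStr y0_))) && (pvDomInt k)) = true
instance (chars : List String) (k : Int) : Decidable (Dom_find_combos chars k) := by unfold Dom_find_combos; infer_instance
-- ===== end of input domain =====

-- B replaces A's accumulating while-loop + final sort by a short recursion on k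
-- (extend the sorted (k-1)-length strings by one character, sort each level); same values, objective: simpler.

-- ===== PORT A =====
-- the while loop 'i = 1; while i < k: …; i += 1' runs exactly (k-1).toNat times
def find_combos_loopA (chars : List String) (strs : List String) : Nat → List String
  | 0 => strs
  | n + 1 =>
      -- new_strings = []; for char in chars: for char_string in char_strings: new_strings.append(char_string + char)
      find_combos_loopA chars
        (chars.foldl (fun new_strings ch =>
          strs.foldl (fun ns cs => ns ++ [cs ++ ch]) new_strings) []) n

def find_combos (chars : List String) (k : Int) : List String :=
  -- char_strings = list(chars); loop; char_strings.sort(); return char_strings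
  PySem.List.sorted (find_combos_loopA chars chars (k - 1).toNat) (fun x => x) false

-- ===== PORT B =====
-- Source B recurses on the Int k with base case k ≤ 1; since k ≤ 1 ↔ (k-1).toNat = 0 and each call
-- decreases k by 1, the recursion is transcribed on the Nat (k-1).toNat.
def find_combos_alt_go (chars : List String) : Nat → List String
  | 0 => PySem.List.sorted chars (fun x => x) false
  | n + 1 =>
      PySem.List.sorted
        ((find_combos_alt_go chars n).flatMap (fun prev => chars.map (fun c => prev ++ c)))
        (fun x => x) false

def find_combos_alt (chars : List String) (k : Int) : List String :=
  find_combos_alt_go chars (k - 1).toNat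

-- ===== PRECONDITION & SPEC =====
def Spec_find_combos (chars : List String) (k : Int) (out : List String) : Prop := out = find_combos_alt chars k
instance (chars : List String) (k : Int) (out : List String) : Decidable (Spec_find_combos chars k out) := by unfold Spec_find_combos; infer_instance

-- ===== CLAIM (what is proved, stated in full; the proofs are below) =====
def Claim_equal_find_combos : Prop := ∀ (chars : List String) (k : Int), Dom_find_combos chars k → Spec_find_combos chars k (find_combos chars k)

-- ===== LEMMAS AND PROOFS =====

-- A's one loop body, in flatMap form
def pvStepA (chars strs : List String) : List String :=
  chars.flatMap (fun ch => strs.map (fun cs => cs ++ ch))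

theorem pv_flatMap_single {a b : Type} (f : a → b) (l : List a) :
    (l.flatMap fun x => [f x]) = l.map f := by
  induction l with
  | nil => rfl
  | cons x l ih => simp [List.flatMap_cons, ih]

theorem pvStepA_eq (chars strs : List String) :
    (chars.foldl (fun new_strings ch =>
      strs.foldl (fun ns cs => ns ++ [cs ++ ch]) new_strings) []) = pvStepA chars strs := by
  simp [pvStepA, ← List.flatMap_def, pv_flatMap_single]

theorem pvLoopA_succ (chars strs : List String) (n : Nat) :
    find_combos_loopA chars strs (n + 1) = pvStepA chars (find_combos_loopA chars strs n) := by
  induction n generalizing strs with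
  | zero => simpa [find_combos_loopA] using pvStepA_eq chars strs
  | succ n ih =>
      have hdef : ∀ s : List String, find_combos_loopA chars s (n + 1) = find_combos_loopA chars (pvStepA chars s) n := by
        intro s
        rw [find_combos_loopA, pvStepA_eq]
      calc find_combos_loopA chars strs (n + 1 + 1)
          = find_combos_loopA chars (pvStepA chars strs) (n + 1) := by
            rw [find_combos_loopA, pvStepA_eq]
        _ = pvStepA chars (find_combos_loopA chars (pvStepA chars strs) n) := ih _
        _ = pvStepA chars (find_combos_loopA chars strs (n + 1)) := by rw [hdef strs]

theorem pv_cons_perm {a b : Type} (f : a → b) (g : a → List b) (l : List a) :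
    (l.map f ++ l.flatMap g).Perm (l.flatMap fun x => f x :: g x) := by
  induction l with
  | nil => simp
  | cons x l ih =>
      simp only [List.map_cons, List.flatMap_cons, List.cons_append]
      refine List.Perm.cons _ ?_
      have h1 : (l.map f ++ (g x ++ l.flatMap g)).Perm (g x ++ (l.map f ++ l.flatMap g)) := by
        rw [← List.append_assoc, ← List.append_assoc]
        exact (List.perm_append_comm).append_right _
      exact h1.trans (ih.append_left (g x))

-- transposing the product: extending each of strs by each of chars is a permutation of
-- extending, for each char, each of strs
theorem pvStep_transpose (chars strs : List String) :
    (strs.flatMap (fun prev => chars.map (fun c => prev ++ c))).Perm (pvStepA chars strs) := by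
  induction strs with
  | nil => simp [pvStepA]
  | cons s strs ih =>
      have hrw : pvStepA chars (s :: strs)
          = chars.flatMap (fun ch => (s ++ ch) :: strs.map (fun cs => cs ++ ch)) := by
        simp [pvStepA]
      rw [List.flatMap_cons, hrw]
      exact (ih.append_left (chars.map (fun c => s ++ c))).trans
        (pv_cons_perm (fun ch => s ++ ch) (fun ch => strs.map (fun cs => cs ++ ch)) chars)

theorem pv_goB_sorted (chars : List String) (n : Nat) :
    PySem.List.sorted (find_combos_alt_go chars n) (fun x => x) false = find_combos_alt_go chars n := by
  cases n <;> simp [find_combos_alt_go, PySem.List.sorted_sorted]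

theorem pv_goB_perm (chars : List String) (n : Nat) :
    (find_combos_alt_go chars n).Perm (find_combos_loopA chars chars n) := by
  induction n with
  | zero => exact PySem.List.sorted_perm chars (fun x => x) false
  | succ n ih =>
      rw [pvLoopA_succ]
      refine List.Perm.trans (PySem.List.sorted_perm _ _ _) ?_
      refine List.Perm.trans ?_ (pvStep_transpose chars (find_combos_loopA chars chars n))
      exact ih.flatMap_right _

-- ===== VERDICT (by name: the statement is the Claim_ definition above) =====
theorem find_combos_spec : Claim_equal_find_combos := by
  intro chars k _
  show find_combos chars k = find_combos_alt chars k
  unfold find_combos find_combos_alt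
  rw [← pv_goB_sorted chars (k - 1).toNat]
  exact (PySem.List.sorted_id_eq_sorted_id_iff_perm _ _).mpr (pv_goB_perm chars _).symm
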